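-- pv_equiv track=rewrite | github.com/hi-hj/algorithm-study | 카카오/test1.py | solution
-- ===== SOURCE A (Python) =====
-- def solution(s):
--     word = {'zero':'0', 'one':'1','two':'2','three':'3',
--             'four':'4', 'five':'5', 'six':'6', 'seven':'7',
--             'eight':'8', 'nine':'9'}
--
--     for key, val in word.items():
--         while key in s:
--             s = s.replace(key, val)
--
--     return int(s)
-- ===== SOURCE B (Python) =====
-- def solution(s):
--     words = ['zero', 'one', 'two', 'three', 'four',
--              'five', 'six', 'seven', 'eight', 'nine']
--     out = []
--     i = 0
--     while i < len(s):
--         for d, w in enumerate(words):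
--             if s.startswith(w, i):
--                 out.append(str(d))
--                 i += len(w)
--                 break
--         else:
--             out.append(s[i])
--             i += 1
--     return int(''.join(out))
-- ===== Notes on version B (the rewrite author's own statement) =====
-- stated objective: alternative
-- what changed: B builds the result in one left-to-right scan that matches the ten spelled words positionally (appending the digit, or the unmatched character unchanged) and converts once at the end, instead of A's ten repeated whole-string replace passes.
import Mathlib
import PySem

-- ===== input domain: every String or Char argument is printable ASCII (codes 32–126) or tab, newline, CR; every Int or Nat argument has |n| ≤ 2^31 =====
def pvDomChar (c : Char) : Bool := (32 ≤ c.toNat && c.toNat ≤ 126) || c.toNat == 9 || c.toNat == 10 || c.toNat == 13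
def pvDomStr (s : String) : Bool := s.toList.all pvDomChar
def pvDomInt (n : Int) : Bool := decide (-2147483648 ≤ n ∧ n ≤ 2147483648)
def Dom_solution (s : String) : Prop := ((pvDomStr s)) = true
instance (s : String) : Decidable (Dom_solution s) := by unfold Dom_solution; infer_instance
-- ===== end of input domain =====

-- B replaces A's ten repeated full-string replace passes by one left-to-right
-- position-based matching scan; equal return value on Pre_ (where A's int() succeeds).

-- ===== PORT A =====
-- the dict of A, in insertion order
def wordTable : List (List Char × List Char) :=
  [(['z','e','r','o'], ['0']), (['o','n','e'], ['1']), (['t','w','o'], ['2']),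
   (['t','h','r','e','e'], ['3']), (['f','o','u','r'], ['4']), (['f','i','v','e'], ['5']),
   (['s','i','x'], ['6']), (['s','e','v','e','n'], ['7']), (['e','i','g','h','t'], ['8']),
   (['n','i','n','e'], ['9'])]

-- "while key in s: s = s.replace(key, val)"; each productive pass shortens s by ≥ 2,
-- so fuel = length + 1 never runs out (the guard only makes the loop total)
def replWhile (key val : List Char) : Nat → List Char → List Char
  | 0, l => l
  | n + 1, l =>
    if PySem.Chars.isIn key l then replWhile key val n (PySem.Chars.replace l key val) else l

def solution (s : String) : Int :=
  ((PySem.Int.ofChars?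
    (wordTable.foldl (fun t kv => replWhile kv.1 kv.2 (t.length + 1) t) s.toList)).getD 0)

-- ===== PORT B =====
-- Source B's word list; index = digit value
def wordsB : List (List Char × Char) :=
  [(['z','e','r','o'], '0'), (['o','n','e'], '1'), (['t','w','o'], '2'),
   (['t','h','r','e','e'], '3'), (['f','o','u','r'], '4'), (['f','i','v','e'], '5'),
   (['s','i','x'], '6'), (['s','e','v','e','n'], '7'), (['e','i','g','h','t'], '8'),
   (['n','i','n','e'], '9')]

-- Source B's inner for-loop: first word of the list matching at the current position
def matchWordB (l : List Char) : Option (Char × List Char) :=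
  wordsB.findSome? (fun wd => if wd.1.isPrefixOf l then some (wd.2, l.drop wd.1.length) else none)

-- a successful match consumes at least one character (port-internal termination fact)
theorem matchWordB_shrink {l : List Char} {d : Char} {r : List Char}
    (h : matchWordB l = some (d, r)) : r.length < l.length := by
  simp only [matchWordB, wordsB, List.findSome?] at h
  repeat' split at h
  all_goals simp_all
  all_goals (rename_i heq; obtain ⟨⟨u, hu⟩, hd, hr⟩ := heq; subst hu; rw [← hr]; simp <;> omega)

-- Source B's while loop over positions
def scanB : List Char → List Char
  | [] => []
  | c :: t =>
    match h : matchWordB (c :: t) with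
    | some (d, r) => d :: scanB r
    | none => c :: scanB t
termination_by l => l.length
decreasing_by
  · exact matchWordB_shrink h
  · simp

def solution_alt (s : String) : Int :=
  ((PySem.Int.ofChars? (scanB s.toList)).getD 0)

-- ===== PRECONDITION & SPEC =====
-- Pre_ admits exactly the strings on which A's final int() succeeds: optional
-- whitespace, an optional sign, then a nonempty sequence of tokens (a decimal digit
-- or a spelled digit word) with single underscores between tokens, then optional
-- whitespace.  Outside Pre_ A raises ValueError.
def isWSC (c : Char) : Bool := c == ' ' || c == '\t' || c == '\n' || c == '\r'

def isDigC (c : Char) : Bool := '0' ≤ c && c ≤ '9'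

-- grammar checker for the token body; the flag is true when a token MUST follow
def bodyScan : List Char → Bool → Bool
  | [], e => !e
  | '_' :: t, false => bodyScan t true
  | 'z'::'e'::'r'::'o'::t, _ => bodyScan t false
  | 'o'::'n'::'e'::t, _ => bodyScan t false
  | 't'::'w'::'o'::t, _ => bodyScan t false
  | 't'::'h'::'r'::'e'::'e'::t, _ => bodyScan t false
  | 'f'::'o'::'u'::'r'::t, _ => bodyScan t false
  | 'f'::'i'::'v'::'e'::t, _ => bodyScan t false
  | 's'::'i'::'x'::t, _ => bodyScan t false
  | 's'::'e'::'v'::'e'::'n'::t, _ => bodyScan t false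
  | 'e'::'i'::'g'::'h'::'t'::t, _ => bodyScan t false
  | 'n'::'i'::'n'::'e'::t, _ => bodyScan t false
  | c :: t, _ => isDigC c && bodyScan t false

def dropSign : List Char → List Char
  | '+' :: t => t
  | '-' :: t => t
  | t => t

def coreOf (l : List Char) : List Char :=
  ((l.dropWhile isWSC).reverse.dropWhile isWSC).reverse

def Pre_solution (s : String) : Prop :=
  bodyScan (dropSign (coreOf s.toList)) true = true

instance (s : String) : Decidable (Pre_solution s) := by unfold Pre_solution; infer_instance

def pvWitness_solution : String := "one2three"

def Spec_solution (s : String) (out : Int) : Prop := out = solution_alt s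
instance (s : String) (out : Int) : Decidable (Spec_solution s out) := by unfold Spec_solution; infer_instance

-- ===== CLAIM (what is proved, stated in full; the proofs are below) =====
def Claim_equal_solution : Prop := ∀ (s : String), Dom_solution s → Pre_solution s → Spec_solution s (solution s)

-- ===== LEMMAS AND PROOFS =====

-- items of a token structure: a non-letter literal character, or spelled word j
inductive Itm where
  | lit : Char → Itm
  | wd : Nat → Itm

def wstr : Nat → List Char
  | 0 => ['z','e','r','o']
  | 1 => ['o','n','e']
  | 2 => ['t','w','o']
  | 3 => ['t','h','r','e','e']
  | 4 => ['f','o','u','r']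
  | 5 => ['f','i','v','e']
  | 6 => ['s','i','x']
  | 7 => ['s','e','v','e','n']
  | 8 => ['e','i','g','h','t']
  | 9 => ['n','i','n','e']
  | _ => []

def dchar : Nat → Char
  | 0 => '0' | 1 => '1' | 2 => '2' | 3 => '3' | 4 => '4'
  | 5 => '5' | 6 => '6' | 7 => '7' | 8 => '8' | _ => '9'

-- rendering after A has processed the first k keys
def itmStr (k : Nat) : Itm → List Char
  | .lit c => [c]
  | .wd j => if j < k then [dchar j] else wstr j

def rend (k : Nat) (items : List Itm) : List Char := (items.map (itmStr k)).flatten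

def lowerC (c : Char) : Bool := 'a' ≤ c && c ≤ 'z'

def GoodI : Itm → Prop
  | .lit c => lowerC c = false
  | .wd j => j < 10

def Good (items : List Itm) : Prop := ∀ it ∈ items, GoodI it

-- ---- small list facts ----
theorem pfx_split {p a b : List Char} (h : p <+: a ++ b) :
    p <+: a ∨ ∃ q, q <+: b ∧ p = a ++ q := by
  induction a generalizing p with
  | nil => exact .inr ⟨p, by simpa using h, by simp⟩
  | cons x a' ih =>
    cases p with
    | nil => exact .inl (List.nil_prefix)
    | cons y p' =>
      rw [List.cons_append, List.cons_prefix_cons] at h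
      obtain ⟨rfl, h'⟩ := h
      rcases ih h' with hp | ⟨q, hq, rfl⟩
      · exact .inl (List.cons_prefix_cons.mpr ⟨rfl, hp⟩)
      · exact .inr ⟨q, hq, by simp⟩

theorem sfx_split {t a b : List Char} (h : t <:+ a ++ b) :
    (∃ s, s <:+ a ∧ t = s ++ b) ∨ t <:+ b := by
  induction a with
  | nil => exact .inr (by simpa using h)
  | cons x a' ih =>
    rw [List.cons_append, List.suffix_cons_iff] at h
    rcases h with rfl | h
    · exact .inl ⟨x :: a', List.suffix_refl _, by simp⟩
    · rcases ih h with ⟨s, hs, rfl⟩ | h'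
      · exact .inl ⟨s, hs.trans (List.suffix_cons x a'), rfl⟩
      · exact .inr h'

-- ---- finite facts about the ten words (checked by decide) ----
theorem wordsLower : ∀ k ∈ List.range 10, wstr k ≠ [] ∧ (wstr k).all lowerC = true := by decide

set_option maxRecDepth 100000 in
theorem wf1 : ∀ k ∈ List.range 10, ∀ j ∈ List.range 10, k ≠ j →
    ∀ s' ∈ (wstr j).tails, ¬ wstr k <+: s' := by decide

set_option maxRecDepth 100000 in
theorem wf3 : ∀ k ∈ List.range 10, ∀ j ∈ List.range 10, k ≠ j → ∀ s' ∈ (wstr j).tails, s' ≠ [] →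
    s' <+: wstr k → s'.length < (wstr k).length →
    ∀ m ∈ List.range 10, ¬ ((wstr k).drop s'.length <+: wstr m) ∧ ¬ (wstr m <+: (wstr k).drop s'.length) := by decide

theorem dchar_notLower (j : Nat) : lowerC (dchar j) = false := by
  unfold dchar; split <;> decide

-- a word never begins at a non-letter character
theorem notPre_head {c : Char} (hc : lowerC c = false) {k : Nat} (hk : k < 10) (R : List Char) :
    ¬ wstr k <+: (c :: R) := by
  interval_cases k <;>
    (rintro ⟨t2, ht⟩; simp only [wstr, List.cons_append, List.cons.injEq] at ht;
     obtain ⟨rfl, -⟩ := ht; simp [lowerC] at hc)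

-- any nonempty lowercase-headed prefix of a rendering aligns with a word of the structure
theorem align {κ : Nat} {items : List Itm} (hg : Good items) :
    ∀ p, p <+: rend κ items → ∀ c q, p = c :: q → lowerC c = true →
      ∃ m < 10, (p <+: wstr m ∨ wstr m <+: p) := by
  intro p hp c q hpc hc
  subst hpc
  cases items with
  | nil =>
    simp only [rend, List.map_nil, List.flatten_nil, List.prefix_nil] at hp
    exact absurd hp (List.cons_ne_nil c q)
  | cons it rest =>
    have hgi : GoodI it := hg it List.mem_cons_self
    have hsplit : rend κ (it :: rest) = itmStr κ it ++ rend κ rest := by simp [rend]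
    rw [hsplit] at hp
    cases it with
    | lit c' =>
      simp only [itmStr, List.singleton_append] at hp
      obtain ⟨rfl, -⟩ := List.cons_prefix_cons.mp hp
      simp [GoodI, hc] at hgi
    | wd j =>
      by_cases hj : j < κ
      · simp only [itmStr, if_pos hj, List.singleton_append] at hp
        obtain ⟨he, -⟩ := List.cons_prefix_cons.mp hp
        rw [he, dchar_notLower] at hc; cases hc
      · simp only [itmStr, if_neg hj] at hp
        rcases pfx_split hp with hp1 | ⟨q', hq', hpe⟩
        · exact ⟨j, hgi, .inl hp1⟩
        · exact ⟨j, hgi, .inr ⟨q', hpe.symm⟩⟩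

-- word k never begins inside or across word j (j ≠ k) followed by a rendering
theorem np1 {k j : Nat} (hk : k < 10) (hj : j < 10) (hkj : k ≠ j)
    {s' : List Char} (hs : s' <:+ wstr j) (hne : s' ≠ [])
    {κ : Nat} {rest : List Itm} (hg : Good rest) :
    ¬ wstr k <+: s' ++ rend κ rest := by
  intro h
  have hkr : k ∈ List.range 10 := List.mem_range.mpr hk
  have hjr : j ∈ List.range 10 := List.mem_range.mpr hj
  have hst : s' ∈ (wstr j).tails := (List.mem_tails _ _).mpr hs
  rcases List.prefix_or_prefix_of_prefix h (List.prefix_append s' (rend κ rest)) with h1 | h1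
  · exact wf1 k hkr j hjr hkj s' hst h1
  · by_cases hlen : (wstr k).length ≤ s'.length
    · have : s' = wstr k := List.IsPrefix.eq_of_length_le h1 hlen
      exact wf1 k hkr j hjr hkj s' hst (this ▸ List.prefix_refl _)
    · rw [not_le] at hlen
      have hkeq : s' ++ (wstr k).drop s'.length = wstr k := List.prefix_iff_eq_append.mp h1
      set p := (wstr k).drop s'.length with hpdef
      have hpR : p <+: rend κ rest := by
        rw [← hkeq] at h
        exact (List.prefix_append_right_inj s').mp h
      have hpne : p ≠ [] := by
        simp only [hpdef]
        intro hco
        have := List.drop_eq_nil_iff.mp hco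
        omega
      obtain ⟨c, q, hcq⟩ : ∃ c q, p = c :: q := by
        cases hpe : p with
        | nil => exact absurd hpe hpne
        | cons c q => exact ⟨c, q, rfl⟩
      have hcl : lowerC c = true := by
        have hcmem : c ∈ wstr k := by
          have : c ∈ p := by rw [hcq]; exact List.mem_cons_self
          exact List.drop_subset _ _ this
        exact List.all_eq_true.mp (wordsLower k hkr).2 c hcmem
      obtain ⟨m, hm, hcase⟩ := align hg p hpR c q hcq hcl
      have hmr : m ∈ List.range 10 := List.mem_range.mpr hm
      have := wf3 k hkr j hjr hkj s' hst hne h1 hlen m hmr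
      rcases hcase with hx | hx
      · exact this.1 hx
      · exact this.2 hx

-- suffixes of a rendering decompose at an item boundary
theorem sufDecomp {κ : Nat} {items : List Itm} (hg : Good items) {t : List Char}
    (h : t <:+ rend κ items) :
    t = [] ∨ ∃ it rest s', Good rest ∧ GoodI it ∧ s' <:+ itmStr κ it ∧ s' ≠ [] ∧
      t = s' ++ rend κ rest := by
  induction items with
  | nil =>
    left
    simpa [rend] using List.suffix_nil.mp (by simpa [rend] using h)
  | cons it rest ih =>
    have hgr : Good rest := fun x hx => hg x (List.mem_cons_of_mem _ hx)
    have hsplit : rend κ (it :: rest) = itmStr κ it ++ rend κ rest := by simp [rend]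
    rw [hsplit] at h
    rcases sfx_split h with ⟨s, hsu, rfl⟩ | h2
    · rcases hse : s with _ | ⟨c, q⟩
      · subst hse
        simpa using ih hgr (List.suffix_refl _)
      · subst hse
        right
        exact ⟨it, rest, c :: q, hgr, hg it List.mem_cons_self, hsu, by simp, rfl⟩
    · exact ih hgr h2

-- word k does not occur in a rendering whose wd-k items are already digits
theorem noOcc {k : Nat} (hk : k < 10) {κ : Nat} (hκ : k < κ) {items : List Itm} (hg : Good items) :
    ¬ wstr k <:+: rend κ items := by
  intro h
  obtain ⟨t, hpt, hst⟩ := List.infix_iff_prefix_suffix.mp h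
  rcases sufDecomp hg hst with rfl | ⟨it, rest, s', hgr, hgi, hsu, hsne, rfl⟩
  · exact (wordsLower k (List.mem_range.mpr hk)).1 (List.prefix_nil.mp hpt)
  · cases it with
    | lit c =>
      simp only [itmStr] at hsu
      have hs1 : s' = [c] := by
        rcases List.suffix_cons_iff.mp hsu with h1 | h1
        · exact h1
        · exact absurd (List.suffix_nil.mp h1) hsne
      subst hs1
      exact notPre_head hgi hk _ hpt
    | wd j =>
      by_cases hj : j < κ
      · simp only [itmStr, if_pos hj] at hsu
        have hs1 : s' = [dchar j] := by
          rcases List.suffix_cons_iff.mp hsu with h1 | h1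
          · exact h1
          · exact absurd (List.suffix_nil.mp h1) hsne
        subst hs1
        exact notPre_head (dchar_notLower j) hk _ hpt
      · simp only [itmStr, if_neg hj] at hsu
        have hkj : k ≠ j := by omega
        exact np1 hk hgi hkj hsu hsne hgr hpt

theorem go_nil (old new acc : List Char) (fuel : Nat) :
    PySem.Chars.replace.go old new fuel [] acc = acc.reverse := by
  cases fuel <;> rw [PySem.Chars.replace.go] <;> simp

theorem go_cons (old new : List Char) (m : Nat) (c : Char) (t acc : List Char) :
    PySem.Chars.replace.go old new (m + 1) (c :: t) acc =
      if old.isPrefixOf (c :: t) then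
        PySem.Chars.replace.go old new m (List.drop old.length (c :: t)) (new.reverse ++ acc)
      else PySem.Chars.replace.go old new m t (c :: acc) := by
  rw [PySem.Chars.replace.go]

theorem replace_eq_go (s old new : List Char) (h : old ≠ []) :
    PySem.Chars.replace s old new = PySem.Chars.replace.go old new s.length s [] := by
  rw [PySem.Chars.replace]; simp [List.isEmpty_iff, h]

-- go steps over a block of characters at which word k never begins
theorem go_step {k : Nat} (hk : k < 10) (u R acc : List Char) (fuel : Nat)
    (hyp : ∀ s', s' <:+ u → s' ≠ [] → ¬ wstr k <+: s' ++ R)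
    (hf : u.length + R.length ≤ fuel) :
    PySem.Chars.replace.go (wstr k) [dchar k] fuel (u ++ R) acc =
      PySem.Chars.replace.go (wstr k) [dchar k] (fuel - u.length) R (u.reverse ++ acc) := by
  induction u generalizing acc fuel with
  | nil => simp
  | cons c u' ih =>
    cases fuel with
    | zero => simp at hf
    | succ m =>
      rw [List.cons_append, go_cons]
      have hnp : (wstr k).isPrefixOf (c :: (u' ++ R)) = false := by
        rw [Bool.eq_false_iff]
        intro hb
        exact hyp (c :: u') (List.suffix_refl _) (List.cons_ne_nil c u')
          (by simpa using List.isPrefixOf_iff_prefix.mp hb)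
      rw [hnp]
      simp only [Bool.false_eq_true, if_false]
      have := ih (c :: acc) m
        (fun s' hs hne => hyp s' (hs.trans (List.suffix_cons c u')) hne)
        (by simp at hf ⊢; omega)
      rw [this]
      simp [Nat.succ_sub_succ]

-- one full replace pass turns every word-k item into its digit
theorem go_main {k : Nat} (hk : k < 10) {items : List Itm} (hg : Good items) :
    ∀ acc fuel, (rend k items).length ≤ fuel →
    PySem.Chars.replace.go (wstr k) [dchar k] fuel (rend k items) acc =
      acc.reverse ++ rend (k + 1) items := by
  induction items with
  | nil => intro acc fuel _; simp [rend, go_nil]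
  | cons it rest ih =>
    intro acc fuel hf
    have hgr : Good rest := fun x hx => hg x (List.mem_cons_of_mem _ hx)
    have hgi : GoodI it := hg it List.mem_cons_self
    have hsplit : ∀ κ, rend κ (it :: rest) = itmStr κ it ++ rend κ rest := by simp [rend]
    rw [hsplit] at hf ⊢
    cases it with
    | lit c =>
      simp only [itmStr, List.singleton_append] at hf ⊢
      cases fuel with
      | zero => simp at hf
      | succ m =>
        rw [go_cons]
        have hnp : (wstr k).isPrefixOf (c :: rend k rest) = false := by
          rw [Bool.eq_false_iff]
          intro hb
          exact notPre_head hgi hk _ (List.isPrefixOf_iff_prefix.mp hb)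
        rw [hnp]
        simp only [Bool.false_eq_true, if_false]
        rw [ih hgr (c :: acc) m (by simp at hf; omega)]
        simp [hsplit, itmStr]
    | wd j =>
      by_cases hj : j < k
      · simp only [itmStr, if_pos hj, if_pos (by omega : j < k + 1), List.singleton_append] at hf ⊢
        cases fuel with
        | zero => simp at hf
        | succ m =>
          rw [go_cons]
          have hnp : (wstr k).isPrefixOf (dchar j :: rend k rest) = false := by
            rw [Bool.eq_false_iff]
            intro hb
            exact notPre_head (dchar_notLower j) hk _ (List.isPrefixOf_iff_prefix.mp hb)
          rw [hnp]
          simp only [Bool.false_eq_true, if_false]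
          rw [ih hgr (dchar j :: acc) m (by simp at hf; omega)]
          simp [hsplit, itmStr, hj, Nat.lt_succ_of_lt hj]
      · by_cases hjk : j = k
        · subst hjk
          simp only [itmStr, if_neg hj, if_pos (by omega : j < j + 1)] at hf ⊢
          have hwne : wstr j ≠ [] := (wordsLower j (List.mem_range.mpr hgi)).1
          obtain ⟨w0, wr, hw⟩ : ∃ w0 wr, wstr j = w0 :: wr := by
            cases hwe : wstr j with
            | nil => exact absurd hwe hwne
            | cons a b => exact ⟨a, b, rfl⟩
          have hlw : 1 ≤ (wstr j).length := by rw [hw]; simp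
          cases fuel with
          | zero => simp [hw] at hf
          | succ m =>
            rw [hw, List.cons_append, go_cons, ← List.cons_append, ← hw]
            have hpt : (wstr j).isPrefixOf (wstr j ++ rend j rest) = true := by
              rw [List.isPrefixOf_iff_prefix]; exact List.prefix_append _ _
            rw [hpt]
            simp only [if_true, List.drop_left]
            rw [show ([dchar j] : List Char).reverse ++ acc = dchar j :: acc by simp]
            rw [ih hgr (dchar j :: acc) m (by rw [List.length_append] at hf; omega)]
            simp [hsplit, itmStr, hj, Nat.lt_succ_self]
        · have hjgt : ¬ j < k + 1 := by omega
          simp only [itmStr, if_neg hj, if_neg hjgt] at hf ⊢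
          rw [go_step hk (wstr j) (rend k rest) acc fuel
            (fun s' hs hne => np1 hk hgi (fun he => hjk he.symm) hs hne hgr)
            (by rw [List.length_append] at hf; omega)]
          rw [ih hgr ((wstr j).reverse ++ acc) (fuel - (wstr j).length)
            (by rw [List.length_append] at hf; omega)]
          simp [hsplit, itmStr, hj, hjgt]

-- if word k does not occur then stage k and stage k+1 render identically
theorem rend_stable {k : Nat} (hk : k < 10) {items : List Itm} (hg : Good items)
    (h : ¬ wstr k <:+: rend k items) : rend k items = rend (k + 1) items := by
  induction items with
  | nil => simp [rend]
  | cons it rest ih =>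
    have hgr : Good rest := fun x hx => hg x (List.mem_cons_of_mem _ hx)
    have hsplit : ∀ κ, rend κ (it :: rest) = itmStr κ it ++ rend κ rest := by simp [rend]
    have hsub : ¬ wstr k <:+: rend k rest := by
      intro hi
      exact h (by rw [hsplit]; exact hi.trans ((List.suffix_append _ _).isInfix))
    rw [hsplit, hsplit, ih hgr hsub]
    congr 1
    cases it with
    | lit c => rfl
    | wd j =>
      by_cases hj : j < k
      · simp only [itmStr, if_pos hj, if_pos (show j < k + 1 by omega)]
      · by_cases hjk : j = k
        · subst hjk
          exfalso
          apply h
          rw [hsplit]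
          simp only [itmStr, if_neg hj]
          exact (List.prefix_append _ _).isInfix
        · simp only [itmStr, if_neg hj, if_neg (show ¬ j < k + 1 by omega)]

-- the whole while-loop for key k advances the stage by one
theorem stage {k : Nat} (hk : k < 10) {items : List Itm} (hg : Good items)
    {fuel : Nat} (hf : (rend k items).length < fuel) :
    replWhile (wstr k) [dchar k] fuel (rend k items) = rend (k + 1) items := by
  cases fuel with
  | zero => omega
  | succ n =>
    rw [replWhile]
    by_cases hin : PySem.Chars.isIn (wstr k) (rend k items) = true
    · rw [hin]
      simp only [if_true]
      have hinf : wstr k <:+: rend k items := by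
        rw [PySem.Chars.isIn_iff_infix] at hin; exact hin
      have hwne : wstr k ≠ [] := (wordsLower k (List.mem_range.mpr hk)).1
      have hlen1 : 1 ≤ (rend k items).length := by
        have := hinf.length_le
        cases hwe : wstr k with
        | nil => exact absurd hwe hwne
        | cons a b => rw [hwe] at this; simp at this; omega
      rw [replace_eq_go _ _ _ hwne, go_main hk hg [] _ (le_refl _)]
      simp only [List.reverse_nil, List.nil_append]
      cases n with
      | zero => omega
      | succ m =>
        rw [replWhile]
        have hno : PySem.Chars.isIn (wstr k) (rend (k + 1) items) = false := by
          rw [PySem.Chars.isIn_eq_false_iff]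
          exact noOcc hk (by omega) hg
        rw [hno]
        simp
    · simp only [Bool.not_eq_true] at hin
      rw [hin]
      simp only [Bool.false_eq_true, if_false]
      exact rend_stable hk hg (fun hi => by
        rw [← PySem.Chars.isIn_iff_infix] at hi
        rw [hi] at hin; cases hin)

-- ---- B side ----
theorem matchWordB_lit {c : Char} (hc : lowerC c = false) (t : List Char) :
    matchWordB (c :: t) = none := by
  have hz : ∀ h : Char, lowerC h = true → ¬(h = c) := by
    intro h hh
    rintro rfl
    rw [hh] at hc; cases hc
  simp [matchWordB, wordsB, List.findSome?, List.isPrefixOf,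
    hz 'z' (by decide), hz 'o' (by decide), hz 't' (by decide), hz 'f' (by decide),
    hz 's' (by decide), hz 'e' (by decide), hz 'n' (by decide)]

theorem matchWordB_wd {j : Nat} (hj : j < 10) (R : List Char) :
    matchWordB (wstr j ++ R) = some (dchar j, R) := by
  interval_cases j <;>
    simp [matchWordB, wordsB, wstr, dchar, List.findSome?, List.isPrefixOf]

theorem scanB_rend {items : List Itm} (hg : Good items) :
    scanB (rend 0 items) = rend 10 items := by
  induction items with
  | nil => simp [rend, scanB]
  | cons it rest ih =>
    have hgr : Good rest := fun x hx => hg x (List.mem_cons_of_mem _ hx)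
    have hgi : GoodI it := hg it List.mem_cons_self
    have hsplit : ∀ κ, rend κ (it :: rest) = itmStr κ it ++ rend κ rest := by simp [rend]
    rw [hsplit, hsplit]
    cases it with
    | lit c =>
      simp only [itmStr, List.singleton_append]
      rw [scanB]
      rw [matchWordB_lit hgi]
      exact congrArg (c :: ·) (ih hgr)
    | wd j =>
      simp only [itmStr, if_neg (by omega : ¬ j < 0), if_pos (show j < 10 from hgi)]
      have hwne : wstr j ≠ [] := (wordsLower j (List.mem_range.mpr hgi)).1
      obtain ⟨w0, wr, hw⟩ : ∃ w0 wr, wstr j = w0 :: wr := by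
        cases hwe : wstr j with
        | nil => exact absurd hwe hwne
        | cons a b => exact ⟨a, b, rfl⟩
      rw [hw, List.cons_append, scanB, ← List.cons_append, ← hw]
      rw [matchWordB_wd hgi]
      exact congrArg (dchar j :: ·) (ih hgr)

-- ---- A side, full fold ----
theorem foldA_rend {items : List Itm} (hg : Good items) :
    wordTable.foldl (fun t kv => replWhile kv.1 kv.2 (t.length + 1) t) (rend 0 items) =
      rend 10 items := by
  have wteq : wordTable = [(wstr 0, [dchar 0]), (wstr 1, [dchar 1]), (wstr 2, [dchar 2]), (wstr 3, [dchar 3]), (wstr 4, [dchar 4]), (wstr 5, [dchar 5]), (wstr 6, [dchar 6]), (wstr 7, [dchar 7]), (wstr 8, [dchar 8]), (wstr 9, [dchar 9])] := rfl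
  rw [wteq]
  simp only [List.foldl_cons, List.foldl_nil]
  rw [stage (k:=0) (by omega) hg (Nat.lt_succ_self _), stage (k:=1) (by omega) hg (Nat.lt_succ_self _), stage (k:=2) (by omega) hg (Nat.lt_succ_self _), stage (k:=3) (by omega) hg (Nat.lt_succ_self _), stage (k:=4) (by omega) hg (Nat.lt_succ_self _), stage (k:=5) (by omega) hg (Nat.lt_succ_self _), stage (k:=6) (by omega) hg (Nat.lt_succ_self _), stage (k:=7) (by omega) hg (Nat.lt_succ_self _), stage (k:=8) (by omega) hg (Nat.lt_succ_self _), stage (k:=9) (by omega) hg (Nat.lt_succ_self _)]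

-- ---- the precondition yields a token structure ----
theorem good_cons {it : Itm} {items : List Itm} (h1 : GoodI it) (h2 : Good items) :
    Good (it :: items) := by
  intro x hx
  rcases List.mem_cons.mp hx with rfl | hm
  · exact h1
  · exact h2 x hm

theorem digC_not_lower {c : Char} (h : isDigC c = true) : lowerC c = false := by
  simp [isDigC] at h
  simp [lowerC]
  intro h1
  exact absurd (le_trans h1 h.2) (by decide)

theorem bodyScan_items_aux : ∀ n (l : List Char) e, l.length ≤ n → bodyScan l e = true →
    ∃ items, Good items ∧ l = rend 0 items := by
  intro n
  induction n with
  | zero =>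
    intro l e hlen h
    cases l with
    | nil => exact ⟨[], fun it hit => absurd hit (List.not_mem_nil), by simp [rend]⟩
    | cons c t => simp at hlen
  | succ n ih =>
    intro l e hlen h
    rw [bodyScan.eq_def] at h
    split at h
    · exact ⟨[], fun it hit => absurd hit (List.not_mem_nil), by simp [rend]⟩
    · obtain ⟨items, hgd, rfl⟩ := ih _ true (by simp at hlen; omega) h
      exact ⟨.lit '_' :: items, good_cons (show lowerC '_' = false by decide) hgd, by simp [rend, itmStr]⟩
    · obtain ⟨items, hgd, rfl⟩ := ih _ false (by simp at hlen; omega) h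
      exact ⟨.wd 0 :: items, good_cons (show (0:Nat) < 10 by decide) hgd, by simp [rend, itmStr, wstr]⟩
    · obtain ⟨items, hgd, rfl⟩ := ih _ false (by simp at hlen; omega) h
      exact ⟨.wd 1 :: items, good_cons (show (1:Nat) < 10 by decide) hgd, by simp [rend, itmStr, wstr]⟩
    · obtain ⟨items, hgd, rfl⟩ := ih _ false (by simp at hlen; omega) h
      exact ⟨.wd 2 :: items, good_cons (show (2:Nat) < 10 by decide) hgd, by simp [rend, itmStr, wstr]⟩
    · obtain ⟨items, hgd, rfl⟩ := ih _ false (by simp at hlen; omega) h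
      exact ⟨.wd 3 :: items, good_cons (show (3:Nat) < 10 by decide) hgd, by simp [rend, itmStr, wstr]⟩
    · obtain ⟨items, hgd, rfl⟩ := ih _ false (by simp at hlen; omega) h
      exact ⟨.wd 4 :: items, good_cons (show (4:Nat) < 10 by decide) hgd, by simp [rend, itmStr, wstr]⟩
    · obtain ⟨items, hgd, rfl⟩ := ih _ false (by simp at hlen; omega) h
      exact ⟨.wd 5 :: items, good_cons (show (5:Nat) < 10 by decide) hgd, by simp [rend, itmStr, wstr]⟩
    · obtain ⟨items, hgd, rfl⟩ := ih _ false (by simp at hlen; omega) h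
      exact ⟨.wd 6 :: items, good_cons (show (6:Nat) < 10 by decide) hgd, by simp [rend, itmStr, wstr]⟩
    · obtain ⟨items, hgd, rfl⟩ := ih _ false (by simp at hlen; omega) h
      exact ⟨.wd 7 :: items, good_cons (show (7:Nat) < 10 by decide) hgd, by simp [rend, itmStr, wstr]⟩
    · obtain ⟨items, hgd, rfl⟩ := ih _ false (by simp at hlen; omega) h
      exact ⟨.wd 8 :: items, good_cons (show (8:Nat) < 10 by decide) hgd, by simp [rend, itmStr, wstr]⟩
    · obtain ⟨items, hgd, rfl⟩ := ih _ false (by simp at hlen; omega) h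
      exact ⟨.wd 9 :: items, good_cons (show (9:Nat) < 10 by decide) hgd, by simp [rend, itmStr, wstr]⟩
    · rw [Bool.and_eq_true] at h
      obtain ⟨items, hgd, rfl⟩ := ih _ false (by simp at hlen; omega) h.2
      exact ⟨.lit _ :: items, good_cons (digC_not_lower h.1) hgd, by simp [rend, itmStr]⟩

theorem bodyScan_items : ∀ l e, bodyScan l e = true →
    ∃ items, Good items ∧ l = rend 0 items := by
  intro l e h
  exact bodyScan_items_aux l.length l e (le_refl _) h

theorem rend_append (κ : Nat) (a b : List Itm) :
    rend κ (a ++ b) = rend κ a ++ rend κ b := by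
  simp [rend]

theorem rend_lits (κ : Nat) (ws : List Char) :
    rend κ (ws.map Itm.lit) = ws := by
  induction ws with
  | nil => simp [rend]
  | cons c t ih => simp [rend, itmStr] at ih ⊢; exact ih

theorem good_append {a b : List Itm} (ha : Good a) (hb : Good b) : Good (a ++ b) := by
  intro x hx
  rcases List.mem_append.mp hx with h | h
  · exact ha x h
  · exact hb x h

theorem good_lits {ws : List Char} (h : ∀ c ∈ ws, lowerC c = false) :
    Good (ws.map Itm.lit) := by
  intro x hx
  obtain ⟨c, hc, rfl⟩ := List.mem_map.mp hx
  exact h c hc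

theorem wsc_not_lower {c : Char} (h : isWSC c = true) : lowerC c = false := by
  simp [isWSC] at h
  rcases h with ((rfl | rfl) | rfl) | rfl <;> decide

theorem dropSign_decomp (core : List Char) :
    ∃ sgn, (∀ c ∈ sgn, lowerC c = false) ∧ core = sgn ++ dropSign core := by
  unfold dropSign
  split
  · exact ⟨['+'], by intro c hc; simp at hc; subst hc; decide, rfl⟩
  · exact ⟨['-'], by intro c hc; simp at hc; subst hc; decide, rfl⟩
  · exact ⟨[], by intro c hc; simp at hc, rfl⟩

theorem pre_items {s : String} (hp : Pre_solution s) :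
    ∃ items, Good items ∧ s.toList = rend 0 items := by
  unfold Pre_solution at hp
  set l := s.toList with hldef
  set ws1 := l.takeWhile isWSC with hws1
  set l1 := l.dropWhile isWSC with hl1def
  have hl : l = ws1 ++ l1 := (List.takeWhile_append_dropWhile).symm
  set core := coreOf l with hcore
  set ws2 := (l1.reverse.takeWhile isWSC).reverse with hws2
  have hl1 : l1 = core ++ ws2 := by
    have h1 : l1.reverse = l1.reverse.takeWhile isWSC ++ l1.reverse.dropWhile isWSC :=
      (List.takeWhile_append_dropWhile).symm
    have h2 : l1 = (l1.reverse.dropWhile isWSC).reverse ++ (l1.reverse.takeWhile isWSC).reverse := by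
      conv_lhs => rw [← List.reverse_reverse l1, h1]
      rw [List.reverse_append]
    rw [h2]; rfl
  obtain ⟨sgn, hsgn, hs⟩ := dropSign_decomp core
  set body := dropSign core with hbody
  obtain ⟨bitems, hbg, hbrend⟩ := bodyScan_items _ _ hp
  refine ⟨ws1.map .lit ++ sgn.map .lit ++ bitems ++ ws2.map .lit, ?_, ?_⟩
  · exact good_append (good_append (good_append
      (good_lits (fun c hc => wsc_not_lower (List.mem_takeWhile_imp hc)))
      (good_lits hsgn)) hbg)
      (good_lits (fun c hc => wsc_not_lower
        (List.mem_takeWhile_imp (List.mem_reverse.mp hc))))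
  · rw [rend_append, rend_append, rend_append, rend_lits, rend_lits, rend_lits, ← hbrend]
    rw [hl, hl1, hs]
    simp [List.append_assoc]

-- ===== VERDICT (by name: the statement is the Claim_ definition above) =====
theorem solution_spec : Claim_equal_solution := by
  intro s _ hp
  obtain ⟨items, hg, hl⟩ := pre_items hp
  unfold Spec_solution solution solution_alt
  rw [hl, foldA_rend hg, scanB_rend hg]
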